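-- pv_equiv track=rewrite | github.com/TalSinay/homeWork4 | final-project.py | Q12
-- ===== SOURCE A (Python) =====
-- def Q12(arr):
--     def ispoli(u):
--         x = -1
--         for i in range(int(len(u)/2)):
--             if u[i]!=u[x]:
--                 return False
--             else:
--                 x-=1
--         return True
--     count = 0
--     for j in range(len(arr)):
--         y=arr[j]
--         p=str(y)
--         if ispoli(p):
--             count=count+1
--     return count
-- ===== SOURCE B (Python) =====
-- def Q12(arr):
--     return sum(1 for y in arr if str(y) == str(y)[::-1])
-- ===== Notes on version B (the rewrite author's own statement) =====
-- stated objective: idiomatic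
-- what changed: The explicit index loop with counter and the two-pointer early-exit palindrome helper are replaced by a single sum-of-generator that compares each str(y) with its full slice reversal.
import Mathlib
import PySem

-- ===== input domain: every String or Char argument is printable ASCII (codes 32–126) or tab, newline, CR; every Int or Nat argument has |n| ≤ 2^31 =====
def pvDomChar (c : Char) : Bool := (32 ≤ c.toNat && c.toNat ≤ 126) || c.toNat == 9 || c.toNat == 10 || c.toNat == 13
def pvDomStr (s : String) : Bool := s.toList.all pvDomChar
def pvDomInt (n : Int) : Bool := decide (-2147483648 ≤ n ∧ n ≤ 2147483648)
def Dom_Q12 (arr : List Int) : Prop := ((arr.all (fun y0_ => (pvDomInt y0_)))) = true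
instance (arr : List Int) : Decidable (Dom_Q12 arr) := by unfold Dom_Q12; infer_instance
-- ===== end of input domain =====

-- B replaces A's counter loop and two-pointer palindrome helper by counting elements whose
-- digit string equals its reversal (idiomatic reverse-and-compare; same cost).

-- ===== PORT A =====
-- A's inner 'ispoli' loop: i walks forward over range(len(u)//2), x walks -1, -2, …;
-- the fuel argument is the number of remaining iterations.  Indices are provably in
-- range on every call A makes, so pyGet? never returns none along A's executions.
def ispoliGo (u : List Char) : Nat → Nat → Int → Bool
  | 0, _, _ => true
  | f + 1, i, x =>
    if PySem.List.pyGet? u (i : Int) ≠ PySem.List.pyGet? u x then false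
    else ispoliGo u f (i + 1) (x - 1)

def ispoli (u : List Char) : Bool := ispoliGo u (u.length / 2) 0 (-1)

def Q12 (arr : List Int) : Int :=
  arr.foldl (fun count y =>
    if ispoli (PySem.Int.toStr y).toList then count + 1 else count) 0

-- ===== PORT B =====
def Q12_alt (arr : List Int) : Int :=
  ((arr.countP (fun y =>
      let l := (PySem.Int.toStr y).toList
      l == l.reverse) : Nat) : Int)

-- ===== PRECONDITION & SPEC =====
def Spec_Q12 (arr : List Int) (out : Int) : Prop := out = Q12_alt arr
instance (arr : List Int) (out : Int) : Decidable (Spec_Q12 arr out) := by unfold Spec_Q12; infer_instance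

-- ===== CLAIM (what is proved, stated in full; the proofs are below) =====
def Claim_equal_Q12 : Prop := ∀ (arr : List Int), Dom_Q12 arr → Spec_Q12 arr (Q12 arr)

-- ===== LEMMAS AND PROOFS =====

-- The half-scan, started at position i with f = n/2 - i remaining steps and x = -(i+1),
-- checks exactly u[k]? = u[n-1-k]? for all i ≤ k < n/2.
theorem ispoliGo_spec (u : List Char) :
    ∀ (f i : Nat), i + f = u.length / 2 →
      (ispoliGo u f i (-(i : Int) - 1) = true ↔
        ∀ k, i ≤ k → k < u.length / 2 → u[k]? = u[u.length - 1 - k]?) := by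
  intro f
  induction f with
  | zero =>
      intro i hi
      simp only [ispoliGo, true_iff]
      intro k hk1 hk2; omega
  | succ f ih =>
      intro i hi
      have hin : i < u.length := by omega
      have h1 : PySem.List.pyGet? u (i : Int) = u[i]? := PySem.List.pyGet?_natCast u i
      have h2 : PySem.List.pyGet? u (-(i : Int) - 1) = u[u.length - (i + 1)]? := by
        have : (-(i : Int) - 1) = -(((i + 1 : Nat)) : Int) := by push_cast; ring
        rw [this, PySem.List.pyGet?_neg_natCast u (i + 1) (by omega) (by omega)]
      have hx : (-(i : Int) - 1 - 1) = -(((i + 1 : Nat)) : Int) - 1 := by push_cast; ring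
      simp only [ispoliGo, h1, h2, ne_eq, ite_not]
      by_cases heq : u[i]? = u[u.length - (i + 1)]?
      · simp only [heq, if_true]
        rw [hx, ih (i + 1) (by omega)]
        constructor
        · intro h k hk1 hk2
          rcases Nat.eq_or_lt_of_le hk1 with heq' | hlt
          · subst heq'
            have : u.length - 1 - i = u.length - (i + 1) := by omega
            rw [this]; exact heq
          · exact h k hlt hk2
        · intro h k hk1 hk2; exact h k (by omega) hk2
      · rw [if_neg heq]
        simp only [Bool.false_eq_true, false_iff]
        intro h
        have : u.length - 1 - i = u.length - (i + 1) := by omega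
        exact heq (by rw [← this]; exact h i le_rfl (by omega))

theorem half_palindrome (u : List Char) :
    (∀ k, 0 ≤ k → k < u.length / 2 → u[k]? = u[u.length - 1 - k]?) ↔ u = u.reverse := by
  constructor
  · intro h
    apply List.ext_getElem?
    intro i
    by_cases hi : i < u.length
    · rw [List.getElem?_reverse hi]
      by_cases hhalf : i < u.length / 2
      · exact h i (Nat.zero_le _) hhalf
      · by_cases hmid : u.length - 1 - i = i
        · rw [hmid]
        · have hk : u.length - 1 - i < u.length / 2 := by omega
          have := h (u.length - 1 - i) (Nat.zero_le _) hk
          have heq : u.length - 1 - (u.length - 1 - i) = i := by omega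
          rw [heq] at this
          exact this.symm
    · rw [List.getElem?_eq_none (by omega), List.getElem?_eq_none (by simp; omega)]
  · intro h k _ hk
    conv_lhs => rw [h]
    rw [List.getElem?_reverse (by omega)]

theorem ispoli_eq (u : List Char) : ispoli u = (u == u.reverse) := by
  have hs := ispoliGo_spec u (u.length / 2) 0 (by omega)
  have h0 : (-(((0 : Nat)) : Int) - 1) = (-1 : Int) := by norm_num
  rw [h0] at hs
  unfold ispoli
  apply Bool.eq_iff_iff.mpr
  rw [hs, beq_iff_eq]
  exact half_palindrome u

theorem foldl_count (p : Int → Bool) (arr : List Int) :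
    ∀ (c : Int),
      arr.foldl (fun count y => if p y then count + 1 else count) c
        = c + ((arr.countP p : Nat) : Int) := by
  induction arr with
  | nil => intro c; simp
  | cons a as ih =>
      intro c
      simp only [List.foldl_cons, List.countP_cons]
      by_cases hp : p a
      · rw [if_pos hp, ih]; simp [hp]; ring
      · rw [if_neg hp, ih]; simp [hp]

-- ===== VERDICT (by name: the statement is the Claim_ definition above) =====
theorem Q12_spec : Claim_equal_Q12 := by
  intro arr _
  unfold Spec_Q12 Q12 Q12_alt
  rw [foldl_count]
  simp only [zero_add]
  congr 1
  apply List.countP_congr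
  intro y _
  rw [ispoli_eq]
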